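-- pv_equiv track=rewrite | github.com/corelli359/intent-router | backend/services/agents/gas-bill-agent/src/gas_bill_agent/finance_utils.py | digit_runs
-- ===== SOURCE A (Python) =====
-- def digit_runs(text: str) -> list[str]:
--     runs: list[str] = []
--     current: list[str] = []
--     for character in text:
--         if character.isdigit():
--             current.append(character)
--             continue
--         if current:
--             runs.append("".join(current))
--             current = []
--     if current:
--         runs.append("".join(current))
--     return runs
-- ===== SOURCE B (Python) =====
-- from itertools import groupby
--
--
-- def digit_runs(text: str) -> list[str]:
--     return ["".join(g) for k, g in groupby(text, str.isdigit) if k]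
-- ===== Notes on version B (the rewrite author's own statement) =====
-- stated objective: idiomatic
-- what changed: Replaces the explicit current-buffer scan with two flush sites by itertools.groupby keyed on str.isdigit, collecting the digit-keyed groups in one comprehension.
import Mathlib
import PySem

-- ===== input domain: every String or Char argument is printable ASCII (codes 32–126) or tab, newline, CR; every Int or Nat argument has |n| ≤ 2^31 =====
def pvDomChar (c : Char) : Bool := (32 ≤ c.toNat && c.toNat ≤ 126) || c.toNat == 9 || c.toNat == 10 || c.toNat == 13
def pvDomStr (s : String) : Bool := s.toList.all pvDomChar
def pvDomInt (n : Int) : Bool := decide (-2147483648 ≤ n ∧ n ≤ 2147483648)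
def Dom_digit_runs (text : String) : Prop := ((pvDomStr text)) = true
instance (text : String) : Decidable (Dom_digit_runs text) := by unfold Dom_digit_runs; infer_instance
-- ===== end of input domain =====

-- B replaces A's explicit current-buffer scan (two flush sites) with a grouping
-- decomposition (itertools.groupby on isdigit, keep the digit groups); same result, same cost.

-- ===== PORT A =====
-- A: fold over the characters with state (runs, current); flush current on a
-- non-digit and once more after the loop.
def digit_runs (text : String) : List String :=
  let st := text.toList.foldl
    (fun (st : List String × List Char) character =>
      if PySem.Chars.isdigit character then (st.1, st.2 ++ [character])
      else if st.2 ≠ [] then (st.1 ++ [String.ofList st.2], []) else st)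
    ([], [])
  if st.2 ≠ [] then st.1 ++ [String.ofList st.2] else st.1

-- ===== PORT B =====
-- B: groupby-style span recursion — take each maximal digit run whole, skip
-- non-digit characters (port of the itertools.groupby comprehension in Source B).
def digit_runs_altGo : List Char → List String
  | [] => []
  | c :: cs =>
    if PySem.Chars.isdigit c then
      String.ofList (c :: cs.takeWhile PySem.Chars.isdigit)
        :: digit_runs_altGo (cs.dropWhile PySem.Chars.isdigit)
    else digit_runs_altGo cs
termination_by cs => cs.length
decreasing_by
  · simpa using Nat.lt_succ_of_le (List.length_dropWhile_le _ _)
  · simp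

def digit_runs_alt (text : String) : List String :=
  digit_runs_altGo text.toList

-- ===== PRECONDITION & SPEC =====
def Spec_digit_runs (text : String) (out : List String) : Prop := out = digit_runs_alt text
instance (text : String) (out : List String) : Decidable (Spec_digit_runs text out) := by unfold Spec_digit_runs; infer_instance

-- ===== CLAIM (what is proved, stated in full; the proofs are below) =====
def Claim_equal_digit_runs : Prop := ∀ (text : String), Dom_digit_runs text → Spec_digit_runs text (digit_runs text)

-- ===== LEMMAS AND PROOFS =====

-- A's flushed fold from state (runs, cur): if cur is empty it yields B's result
-- on cs; otherwise first the run cur ++ <leading digits of cs>, then B on the rest.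
theorem digit_runs_fold (cs : List Char) : ∀ (runs : List String) (cur : List Char),
    (let st := cs.foldl
        (fun (st : List String × List Char) character =>
          if PySem.Chars.isdigit character then (st.1, st.2 ++ [character])
          else if st.2 ≠ [] then (st.1 ++ [String.ofList st.2], []) else st)
        (runs, cur)
     if st.2 ≠ [] then st.1 ++ [String.ofList st.2] else st.1)
      = runs ++ (if cur = [] then digit_runs_altGo cs
          else String.ofList (cur ++ cs.takeWhile PySem.Chars.isdigit)
            :: digit_runs_altGo (cs.dropWhile PySem.Chars.isdigit)) := by
  induction cs with
  | nil =>
    intro runs cur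
    by_cases hcur : cur = [] <;> simp [hcur, digit_runs_altGo]
  | cons c cs ih =>
    intro runs cur
    by_cases hd : PySem.Chars.isdigit c
    · have := ih runs (cur ++ [c])
      by_cases hcur : cur = [] <;>
        simpa [hd, hcur, digit_runs_altGo] using this
    · by_cases hcur : cur = []
      · simpa [hd, hcur, digit_runs_altGo] using ih runs []
      · have h2 := ih (runs ++ [String.ofList cur]) []
        rw [if_pos rfl] at h2
        simp only [List.foldl_cons, hd, Bool.false_eq_true, if_false, ne_eq, hcur,
          not_false_eq_true, if_true]
        rw [h2, List.takeWhile_cons_of_neg (by simp [hd]),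
          List.dropWhile_cons_of_neg (by simp [hd]), digit_runs_altGo, if_neg hd]
        simp

-- ===== VERDICT (by name: the statement is the Claim_ definition above) =====
theorem digit_runs_spec : Claim_equal_digit_runs := by
  intro text _
  show digit_runs text = digit_runs_alt text
  simpa [digit_runs, digit_runs_alt] using digit_runs_fold text.toList [] []
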